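-- pv_equiv track=rewrite | github.com/rishabhkarnwal04/COLD-EMAIL-GENERATOR | cold_email.py | expand_email
-- ===== SOURCE A (Python) =====
-- def expand_email(email: str) -> str:
--     # Very simple example of "AI-style" expansion (handwritten, rule-based for now)
--     replacements = {
--         "Hi there,": "I hope this message finds you well.",
--         "Just reaching out": "I'm reaching out because I genuinely believe this could be of great value to you.",
--         "Wanted to quickly share": "I wanted to take a moment to introduce something that I believe could significantly benefit your operations.",
--         "Let me know if you want to chat": "I'd be happy to schedule a time to talk if you're interested.",
--         "Would you be open to a quick call": "Would you be open to a short conversation to explore how this might help your goals?"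
--     }
--     for key, value in replacements.items():
--         email = email.replace(key, value)
--     return email
-- ===== SOURCE B (Python) =====
-- def expand_email(email: str) -> str:
--     replacements = [
--         ("Hi there,", "I hope this message finds you well."),
--         ("Just reaching out", "I'm reaching out because I genuinely believe this could be of great value to you."),
--         ("Wanted to quickly share", "I wanted to take a moment to introduce something that I believe could significantly benefit your operations."),
--         ("Let me know if you want to chat", "I'd be happy to schedule a time to talk if you're interested."),
--         ("Would you be open to a quick call", "Would you be open to a short conversation to explore how this might help your goals?"),
--     ]
--     out = []
--     i = 0
--     n = len(email)
--     while i < n: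
--         for key, value in replacements:
--             if email.startswith(key, i):
--                 out.append(value)
--                 i += len(key)
--                 break
--         else:
--             out.append(email[i])
--             i += 1
--     return "".join(out)
-- ===== Notes on version B (the rewrite author's own statement) =====
-- stated objective: alternative
-- what changed: B rewrites the email in ONE left-to-right scan, at each position trying the phrase table in order (first match wins, emit expansion, skip key) and copying the character otherwise, instead of A's five sequential full-string str.replace passes.
import Mathlib
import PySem

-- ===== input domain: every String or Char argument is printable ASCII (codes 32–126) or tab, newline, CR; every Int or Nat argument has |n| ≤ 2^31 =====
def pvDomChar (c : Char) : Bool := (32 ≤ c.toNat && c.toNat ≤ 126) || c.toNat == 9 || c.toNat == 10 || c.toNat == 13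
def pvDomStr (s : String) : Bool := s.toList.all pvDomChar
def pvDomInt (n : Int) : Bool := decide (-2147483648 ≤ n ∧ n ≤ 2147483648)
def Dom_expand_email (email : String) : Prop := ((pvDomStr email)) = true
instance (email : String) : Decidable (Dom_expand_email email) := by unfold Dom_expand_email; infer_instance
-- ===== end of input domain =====

-- B replaces A's five sequential full-string replace passes by a single left-to-right scan
-- with a first-match phrase table (objective: alternative, same result proved for every string).

-- ===== PORT A =====
def expand_email (email : String) : String :=
  -- for key, value in replacements.items(): email = email.replace(key, value)
  let email := PySem.Str.replace email "Hi there," "I hope this message finds you well."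
  let email := PySem.Str.replace email "Just reaching out" "I'm reaching out because I genuinely believe this could be of great value to you."
  let email := PySem.Str.replace email "Wanted to quickly share" "I wanted to take a moment to introduce something that I believe could significantly benefit your operations."
  let email := PySem.Str.replace email "Let me know if you want to chat" "I'd be happy to schedule a time to talk if you're interested."
  let email := PySem.Str.replace email "Would you be open to a quick call" "Would you be open to a short conversation to explore how this might help your goals?"
  email

-- ===== PORT B =====
-- the phrase table, in Source B's order
def pvPairs : List (List Char × List Char) :=
  [("Hi there,".toList, "I hope this message finds you well.".toList),
   ("Just reaching out".toList, "I'm reaching out because I genuinely believe this could be of great value to you.".toList),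
   ("Wanted to quickly share".toList, "I wanted to take a moment to introduce something that I believe could significantly benefit your operations.".toList),
   ("Let me know if you want to chat".toList, "I'd be happy to schedule a time to talk if you're interested.".toList),
   ("Would you be open to a quick call".toList, "Would you be open to a short conversation to explore how this might help your goals?".toList)]

-- Source B's while loop: at position i try the keys in order (email.startswith(key, i));
-- on the first hit emit the value and skip len(key), otherwise copy one character.
def pvScan (ps : List (List Char × List Char)) : List Char → List Char
  | [] => []
  | c :: t =>
    match h : List.find? (fun p => !p.1.isEmpty && p.1.isPrefixOf (c :: t)) ps with
    | some p => p.2 ++ pvScan ps ((c :: t).drop p.1.length)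
    | none => c :: pvScan ps t
termination_by s => s.length
decreasing_by
  · have hp := List.find?_some h
    simp only [Bool.and_eq_true, Bool.not_eq_true', List.isEmpty_eq_false_iff] at hp
    have : 1 ≤ p.1.length := List.length_pos_iff.mpr hp.1
    simp only [List.length_drop, List.length_cons]
    omega
  · simp

def expand_email_alt (email : String) : String :=
  String.ofList (pvScan pvPairs email.toList)

-- ===== PRECONDITION & SPEC =====
def Spec_expand_email (email : String) (out : String) : Prop := out = expand_email_alt email
instance (email : String) (out : String) : Decidable (Spec_expand_email email out) := by unfold Spec_expand_email; infer_instance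

-- ===== CLAIM (what is proved, stated in full; the proofs are below) =====
def Claim_equal_expand_email : Prop := ∀ (email : String), Dom_expand_email email → Spec_expand_email email (expand_email email)

-- ===== LEMMAS AND PROOFS =====

-- Python str.replace (non-overlapping, leftmost) as a plain structural recursion, for reasoning.
def pvRep (old new : List Char) : List Char → List Char
  | [] => []
  | c :: t =>
    if h : (!old.isEmpty && old.isPrefixOf (c :: t)) = true then
      new ++ pvRep old new ((c :: t).drop old.length)
    else c :: pvRep old new t
termination_by s => s.length
decreasing_by
  · simp only [Bool.and_eq_true, Bool.not_eq_true', List.isEmpty_eq_false_iff] at h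
    have : 1 ≤ old.length := List.length_pos_iff.mpr h.1
    simp only [List.length_drop, List.length_cons]
    omega
  · simp

-- "neither is a prefix of the other"
def pvNoRel (a b : List Char) : Bool := !a.isPrefixOf b && !b.isPrefixOf a
-- key k' never matches starting anywhere inside v (or crossing its right edge)
def pvInert (k' v : List Char) : Bool := (List.range v.length).all (fun i => pvNoRel k' (v.drop i))
-- no proper nonempty suffix of k' is prefix-related to x
def pvDropsNoRel (k' x : List Char) : Bool := (List.range k'.length).all (fun j => j == 0 || pvNoRel (k'.drop j) x)
-- the keys of ps are pairwise prefix-unrelated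
def pvPwNoRel : List (List Char × List Char) → Bool
  | [] => true
  | p :: ps => ps.all (fun q => pvNoRel p.1 q.1) && pvPwNoRel ps

lemma pvPrefix_split {a b c : List Char} (h : a <+: b ++ c) : a <+: b ∨ b <+: a :=
  List.prefix_or_prefix_of_prefix h (List.prefix_append b c)

lemma pvNoRel_true {a b : List Char} (h : pvNoRel a b = true) : ¬ a <+: b ∧ ¬ b <+: a := by
  simp only [pvNoRel, Bool.and_eq_true, Bool.not_eq_true', List.isPrefixOf_iff_prefix,
    ← Bool.not_eq_true, decide_eq_true_eq] at h
  tauto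

lemma pvRep_nil (old new : List Char) : pvRep old new [] = [] := by rw [pvRep]

lemma pvRep_cons_pos {old : List Char} (new : List Char) {c : Char} {t : List Char}
    (h : (!old.isEmpty && old.isPrefixOf (c :: t)) = true) :
    pvRep old new (c :: t) = new ++ pvRep old new ((c :: t).drop old.length) := by
  rw [pvRep]; simp [h]

lemma pvRep_cons_neg {old : List Char} (new : List Char) {c : Char} {t : List Char}
    (h : ¬ (!old.isEmpty && old.isPrefixOf (c :: t)) = true) :
    pvRep old new (c :: t) = c :: pvRep old new t := by
  rw [pvRep]; simp [h]

lemma pvGo_eq (old new : List Char) (hold : old ≠ []) :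
    ∀ (fuel : Nat) (l acc : List Char), l.length ≤ fuel →
      PySem.Chars.replace.go old new fuel l acc = acc.reverse ++ pvRep old new l := by
  intro fuel
  induction fuel with
  | zero =>
    intro l acc hl
    have : l = [] := List.eq_nil_of_length_eq_zero (Nat.le_zero.mp hl)
    subst this
    simp [PySem.Chars.replace.go, pvRep_nil]
  | succ n ih =>
    intro l acc hl
    cases l with
    | nil => simp [PySem.Chars.replace.go, pvRep_nil]
    | cons c t =>
      by_cases hpre : old.isPrefixOf (c :: t) = true
      · have hcond : (!old.isEmpty && old.isPrefixOf (c :: t)) = true := by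
          simp [hpre, List.isEmpty_eq_false_iff.mpr hold]
        have hlen : ((c :: t).drop old.length).length ≤ n := by
          have : 1 ≤ old.length := List.length_pos_iff.mpr hold
          simp only [List.length_drop, List.length_cons]
          simp only [List.length_cons] at hl
          omega
        rw [show PySem.Chars.replace.go old new (n+1) (c :: t) acc
              = PySem.Chars.replace.go old new n (List.drop old.length (c :: t)) (new.reverse ++ acc) by
            simp [PySem.Chars.replace.go, hpre]]
        rw [ih _ _ hlen, pvRep_cons_pos new hcond]
        simp
      · have hcond : ¬ (!old.isEmpty && old.isPrefixOf (c :: t)) = true := by simp [hpre]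
        rw [show PySem.Chars.replace.go old new (n+1) (c :: t) acc
              = PySem.Chars.replace.go old new n t (c :: acc) by
            simp [PySem.Chars.replace.go, hpre]]
        have hlen : t.length ≤ n := by simp only [List.length_cons] at hl; omega
        rw [ih _ _ hlen, pvRep_cons_neg new hcond]
        simp

lemma pvReplace_eq (s old new : List Char) (hold : old ≠ []) :
    PySem.Chars.replace s old new = pvRep old new s := by
  rw [PySem.Chars.replace]
  simp only [List.isEmpty_eq_false_iff.mpr hold]
  rw [pvGo_eq old new hold s.length s [] le_rfl]
  simp

-- unfolding equations for pvScan
lemma pvScan_nil (ps : List (List Char × List Char)) : pvScan ps [] = [] := by rw [pvScan]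

lemma pvScan_cons_some {ps : List (List Char × List Char)} {c : Char} {t : List Char}
    {p : List Char × List Char}
    (h : List.find? (fun p => !p.1.isEmpty && p.1.isPrefixOf (c :: t)) ps = some p) :
    pvScan ps (c :: t) = p.2 ++ pvScan ps ((c :: t).drop p.1.length) := by
  rw [pvScan]
  split
  · next p' h' => rw [h] at h'; cases h'; rfl
  · next h' => rw [h] at h'; cases h'

lemma pvScan_cons_none {ps : List (List Char × List Char)} {c : Char} {t : List Char}
    (h : List.find? (fun p => !p.1.isEmpty && p.1.isPrefixOf (c :: t)) ps = none) :
    pvScan ps (c :: t) = c :: pvScan ps t := by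
  rw [pvScan]
  split
  · next p' h' => rw [h] at h'; cases h'
  · rfl

lemma pvScan_nil_pairs : ∀ s : List Char, pvScan [] s = s := by
  intro s
  induction s with
  | nil => exact pvScan_nil []
  | cons c t ih => rw [pvScan_cons_none (by simp), ih]

-- scanning passes untouched over an inert block v
lemma pvScan_inert {ps : List (List Char × List Char)} {v : List Char}
    (h : ∀ p ∈ ps, pvInert p.1 v = true) :
    ∀ Z, pvScan ps (v ++ Z) = v ++ pvScan ps Z := by
  induction v with
  | nil => simp
  | cons c v' ih =>
    intro Z
    have hnone : List.find? (fun p => !p.1.isEmpty && p.1.isPrefixOf (c :: (v' ++ Z))) ps = none := by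
      rw [List.find?_eq_none]
      intro p hp
      simp only [Bool.and_eq_true, Bool.not_eq_true', List.isEmpty_eq_false_iff,
        List.isPrefixOf_iff_prefix, ← Bool.not_eq_true, decide_eq_true_eq, not_and]
      intro _ hpre
      have hrel : pvNoRel p.1 (c :: v') = true := by
        have := h p hp
        simp only [pvInert, List.all_eq_true, List.mem_range] at this
        simpa using this 0 (by simp)
      rcases pvPrefix_split (show p.1 <+: (c :: v') ++ Z from hpre) with h1 | h1
      · exact (pvNoRel_true hrel).1 h1
      · exact (pvNoRel_true hrel).2 h1
    have ih' : ∀ p ∈ ps, pvInert p.1 v' = true := by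
      intro p hp
      have := h p hp
      simp only [pvInert, List.all_eq_true, List.mem_range] at this ⊢
      intro i hi
      simpa using this (i + 1) (by simp; omega)
    simp only [List.cons_append]
    rw [pvScan_cons_none hnone, ih ih']

-- pvRep copies a region containing no match of old
lemma pvRep_copy (old new : List Char) :
    ∀ (t X : List Char), (∀ j < t.length, ¬ old <+: (t.drop j ++ X)) →
      pvRep old new (t ++ X) = t ++ pvRep old new X := by
  intro t
  induction t with
  | nil => simp
  | cons c t' ih =>
    intro X h
    have h0 : ¬ old <+: (c :: t') ++ X := by simpa using h 0 (by simp)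
    have hcond : ¬ (!old.isEmpty && old.isPrefixOf ((c :: t') ++ X)) = true := by
      simp only [Bool.and_eq_true, Bool.not_eq_true', List.isPrefixOf_iff_prefix,
        ← Bool.not_eq_true, decide_eq_true_eq, not_and]
      intro _; simpa using h0
    simp only [List.cons_append] at hcond ⊢
    rw [pvRep_cons_neg new hcond, ih X (fun j hj => by simpa using h (j + 1) (by simp; omega))]

-- a key prefix-unrelated to v (at all its suffixes) matching the replaced string matched the original
lemma pvRep_prefix (old v : List Char) (hv : v ≠ []) :
    ∀ (n : Nat) (u k' : List Char), u.length ≤ n → k' ≠ [] →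
      (∀ j < k'.length, pvNoRel (k'.drop j) v = true) →
      k' <+: pvRep old v u → k' <+: u := by
  intro n
  induction n with
  | zero =>
    intro u k' hu hk' _ hpre
    have : u = [] := List.eq_nil_of_length_eq_zero (Nat.le_zero.mp hu)
    subst this
    rw [pvRep_nil] at hpre
    exact absurd (List.prefix_nil.mp hpre) hk'
  | succ n ih =>
    intro u k' hu hk' hrel hpre
    cases u with
    | nil =>
      rw [pvRep_nil] at hpre
      exact absurd (List.prefix_nil.mp hpre) hk'
    | cons c t =>
      by_cases hcond : (!old.isEmpty && old.isPrefixOf (c :: t)) = true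
      · rw [pvRep_cons_pos v hcond] at hpre
        have hrel0 : pvNoRel k' v = true := by simpa using hrel 0 (List.length_pos_iff.mpr hk')
        rcases pvPrefix_split hpre with h1 | h1
        · exact absurd h1 (pvNoRel_true hrel0).1
        · exact absurd h1 (pvNoRel_true hrel0).2
      · rw [pvRep_cons_neg v hcond] at hpre
        cases k' with
        | nil => exact absurd rfl hk'
        | cons d k'' =>
          rw [List.cons_prefix_cons] at hpre
          obtain ⟨rfl, hpre'⟩ := hpre
          cases hk'' : k''.isEmpty with
          | true =>
            have : k'' = [] := List.isEmpty_iff.mp hk''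
            subst this
            simp
          | false =>
            have hne : k'' ≠ [] := List.isEmpty_eq_false_iff.mp hk''
            have hlen : t.length ≤ n := by simp only [List.length_cons] at hu; omega
            have hrel' : ∀ j < k''.length, pvNoRel (k''.drop j) v = true := by
              intro j hj
              simpa using hrel (j + 1) (by simp; omega)
            have := ih t k'' hlen hne hrel' hpre'
            exact List.cons_prefix_cons.mpr ⟨rfl, this⟩

-- first ps-match of k' ++ X stays the first match of k' ++ Z
lemma pvFind_stable {ps : List (List Char × List Char)}
    (hpw : pvPwNoRel ps = true) :
    ∀ (k' v' : List Char) (X Z : List Char),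
      List.find? (fun p => !p.1.isEmpty && p.1.isPrefixOf (k' ++ X)) ps = some (k', v') →
      List.find? (fun p => !p.1.isEmpty && p.1.isPrefixOf (k' ++ Z)) ps = some (k', v') := by
  induction ps with
  | nil => intro _ _ _ _ h; cases h
  | cons p ps ih =>
    intro k' v' X Z h
    simp only [pvPwNoRel, Bool.and_eq_true, List.all_eq_true] at hpw
    rw [List.find?_cons] at h ⊢
    split at h
    · next hP =>
      cases h
      have : k' <+: k' ++ Z := List.prefix_append k' Z
      simp only [Bool.and_eq_true, Bool.not_eq_true', List.isPrefixOf_iff_prefix,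
        ← Bool.not_eq_true, decide_eq_true_eq] at hP
      split
      · rfl
      · next hQ =>
        simp only [Bool.and_eq_true, Bool.not_eq_true', List.isPrefixOf_iff_prefix,
          ← Bool.not_eq_true, decide_eq_true_eq, not_and] at hQ
        exact absurd this (by simpa [hP.1] using hQ)
    · next hP =>
      have hmem : (k', v') ∈ ps := List.mem_of_find?_eq_some h
      have hrel : pvNoRel p.1 k' = true := by simpa using hpw.1 (k', v') hmem
      simp only [Bool.and_eq_true, Bool.not_eq_true', List.isPrefixOf_iff_prefix,
        ← Bool.not_eq_true, decide_eq_true_eq, not_and] at hP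
      split
      · next hQ =>
        simp only [Bool.and_eq_true, Bool.not_eq_true', List.isPrefixOf_iff_prefix,
          ← Bool.not_eq_true, decide_eq_true_eq] at hQ
        rcases pvPrefix_split hQ.2 with h1 | h1
        · exact absurd h1 (pvNoRel_true hrel).1
        · exact absurd h1 (pvNoRel_true hrel).2
      · exact ih hpw.2 k' v' X Z h

-- THE STEP: peeling the highest-priority key off the scan equals one full replace pass
lemma pvStep (k v : List Char) (hk : k ≠ []) (hv : v ≠ [])
    (ps : List (List Char × List Char))
    (hC1 : ∀ p ∈ ps, pvInert p.1 v = true)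
    (hC2 : ∀ p ∈ ps, pvDropsNoRel p.1 k = true)
    (hC3 : pvPwNoRel ps = true)
    (hC4 : ∀ p ∈ ps, pvDropsNoRel p.1 v = true) :
    ∀ (n : Nat) (s : List Char), s.length ≤ n →
      pvScan ((k, v) :: ps) s = pvScan ps (pvRep k v s) := by
  intro n
  induction n with
  | zero =>
    intro s hs
    have : s = [] := List.eq_nil_of_length_eq_zero (Nat.le_zero.mp hs)
    subst this
    rw [pvScan_nil, pvRep_nil, pvScan_nil]
  | succ n ih =>
    intro s hs
    cases s with
    | nil => rw [pvScan_nil, pvRep_nil, pvScan_nil]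
    | cons c t =>
      by_cases hhead : (!k.isEmpty && k.isPrefixOf (c :: t)) = true
      · -- k matches at position 0
        have hfind : List.find? (fun p => !p.1.isEmpty && p.1.isPrefixOf (c :: t)) ((k, v) :: ps)
            = some (k, v) := by rw [List.find?_cons]; simp [hhead]
        rw [pvScan_cons_some hfind, pvRep_cons_pos v hhead,
          pvScan_inert hC1 (pvRep k v ((c :: t).drop k.length))]
        have hlen : ((c :: t).drop k.length).length ≤ n := by
          have : 1 ≤ k.length := List.length_pos_iff.mpr hk
          simp only [List.length_drop, List.length_cons]
          simp only [List.length_cons] at hs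
          omega
        rw [ih _ hlen]
      · -- k does not match at position 0
        have hfind1 : List.find? (fun p => !p.1.isEmpty && p.1.isPrefixOf (c :: t)) ((k, v) :: ps)
            = List.find? (fun p => !p.1.isEmpty && p.1.isPrefixOf (c :: t)) ps := by
          rw [List.find?_cons]; simp only [hhead]
        have hknp : ¬ k <+: (c :: t) := by
          intro hcon
          apply hhead
          simp [List.isEmpty_eq_false_iff.mpr hk, List.isPrefixOf_iff_prefix, hcon]
        cases hfnd : List.find? (fun p => !p.1.isEmpty && p.1.isPrefixOf (c :: t)) ps with
        | some p =>
          obtain ⟨k', v'⟩ := p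
          have hprop := List.find?_some hfnd
          simp only [Bool.and_eq_true, Bool.not_eq_true', List.isEmpty_eq_false_iff,
            List.isPrefixOf_iff_prefix, ← Bool.not_eq_true, decide_eq_true_eq] at hprop
          obtain ⟨hk'ne, hk'pre⟩ := hprop
          have hk'nil : k' ≠ [] := by simpa using hk'ne
          obtain ⟨X, hX⟩ := hk'pre
          have hmem : (k', v') ∈ ps := List.mem_of_find?_eq_some hfnd
          -- LHS
          rw [pvScan_cons_some (hfind1.trans hfnd)]
          -- RHS: pvRep copies k' and continues on X
          have hXdrop : (c :: t).drop k'.length = X := by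
            rw [← hX]; simp
          have hcopy : pvRep k v (c :: t) = k' ++ pvRep k v X := by
            rw [← hX]
            apply pvRep_copy
            intro j hj hcon
            rcases Nat.eq_zero_or_pos j with rfl | hjpos
            · rw [List.drop_zero, hX] at hcon; exact hknp hcon
            · have hd := hC2 (k', v') hmem
              simp only [pvDropsNoRel, List.all_eq_true, List.mem_range] at hd
              have := hd j hj
              simp only [beq_iff_eq, Bool.or_eq_true, decide_eq_true_eq] at this
              have hrel : pvNoRel (k'.drop j) k = true := by
                rcases this with h' | h'
                · omega
                · exact h'
              rcases pvPrefix_split hcon with h1 | h1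
              · exact (pvNoRel_true hrel).2 h1
              · exact (pvNoRel_true hrel).1 h1
          rw [hcopy]
          -- the same first match fires on the rewritten string
          have hX' : List.find? (fun p => !p.1.isEmpty && p.1.isPrefixOf (k' ++ X)) ps
              = some (k', v') := by rw [hX]; exact hfnd
          have hstab := pvFind_stable hC3 k' v' X (pvRep k v X) hX'
          cases hk'c : k' with
          | nil => exact absurd hk'c hk'nil
          | cons d k'rest =>
            rw [hk'c] at hstab
            simp only [List.cons_append] at hstab ⊢
            rw [pvScan_cons_some hstab]
            simp only [← hk'c]
            have hdropZ : (k' ++ pvRep k v X).drop k'.length = pvRep k v X := by simp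
            rw [show (d :: (k'rest ++ pvRep k v X)) = k' ++ pvRep k v X by rw [hk'c]; simp,
              hdropZ]
            have hlen : X.length ≤ n := by
              have h1 : 1 ≤ k'.length := List.length_pos_iff.mpr hk'nil
              have := congrArg List.length hX
              simp only [List.length_append, List.length_cons] at this
              simp only [List.length_cons] at hs
              omega
            rw [hXdrop, ih _ hlen]
        | none =>
          -- no key matches at position 0
          rw [pvScan_cons_none (hfind1.trans hfnd)]
          have hcond : ¬ (!k.isEmpty && k.isPrefixOf (c :: t)) = true := hhead
          rw [pvRep_cons_neg v hcond]
          have hnone' : List.find? (fun p => !p.1.isEmpty && p.1.isPrefixOf (c :: pvRep k v t)) ps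
              = none := by
            rw [List.find?_eq_none]
            intro p hp
            simp only [Bool.and_eq_true, Bool.not_eq_true', List.isEmpty_eq_false_iff,
              List.isPrefixOf_iff_prefix, ← Bool.not_eq_true, decide_eq_true_eq, not_and]
            intro hpne hcon
            have hpnil : p.1 ≠ [] := by simpa using hpne
            -- p.1 <+: c :: pvRep k v t = pvRep k v (c :: t)
            have hre : (c : Char) :: pvRep k v t = pvRep k v (c :: t) :=
              (pvRep_cons_neg v hcond).symm
            rw [hre] at hcon
            have hrelAll : ∀ j < p.1.length, pvNoRel (p.1.drop j) v = true := by
              intro j hj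
              rcases Nat.eq_zero_or_pos j with rfl | hjpos
              · have h1 := hC1 p hp
                simp only [pvInert, List.all_eq_true, List.mem_range] at h1
                simpa using h1 0 (List.length_pos_iff.mpr hv)
              · have h4 := hC4 p hp
                simp only [pvDropsNoRel, List.all_eq_true, List.mem_range] at h4
                have := h4 j hj
                simp only [beq_iff_eq, Bool.or_eq_true, decide_eq_true_eq] at this
                rcases this with h' | h'
                · omega
                · exact h'
            have hporig : p.1 <+: (c :: t) :=
              pvRep_prefix k v hv (c :: t).length (c :: t) p.1 le_rfl hpnil hrelAll hcon
            have := List.find?_eq_none.mp hfnd p hp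
            simp only [Bool.and_eq_true, Bool.not_eq_true', List.isEmpty_eq_false_iff,
              List.isPrefixOf_iff_prefix, ← Bool.not_eq_true, decide_eq_true_eq, not_and] at this
            exact this hpne hporig
          rw [pvScan_cons_none hnone']
          have hlen : t.length ≤ n := by simp only [List.length_cons] at hs; omega
          rw [ih _ hlen]

-- ===== VERDICT (by name: the statement is the Claim_ definition above) =====
theorem expand_email_spec : Claim_equal_expand_email := by
  intro email _
  unfold Spec_expand_email expand_email expand_email_alt
  simp only [PySem.Str.replace, String.toList_ofList]
  congr 1
  rw [pvReplace_eq _ _ _ (by decide), pvReplace_eq _ _ _ (by decide),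
    pvReplace_eq _ _ _ (by decide), pvReplace_eq _ _ _ (by decide),
    pvReplace_eq _ _ _ (by decide)]
  rw [show pvPairs =
    ("Hi there,".toList, "I hope this message finds you well.".toList) ::
    ("Just reaching out".toList, "I'm reaching out because I genuinely believe this could be of great value to you.".toList) ::
    ("Wanted to quickly share".toList, "I wanted to take a moment to introduce something that I believe could significantly benefit your operations.".toList) ::
    ("Let me know if you want to chat".toList, "I'd be happy to schedule a time to talk if you're interested.".toList) ::
    [("Would you be open to a quick call".toList, "Would you be open to a short conversation to explore how this might help your goals?".toList)] from rfl]
  rw [pvStep _ _ (by decide) (by decide) _ (by decide) (by decide) (by decide) (by decide) _ _ le_rfl]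
  rw [pvStep _ _ (by decide) (by decide) _ (by decide) (by decide) (by decide) (by decide) _ _ le_rfl]
  rw [pvStep _ _ (by decide) (by decide) _ (by decide) (by decide) (by decide) (by decide) _ _ le_rfl]
  rw [pvStep _ _ (by decide) (by decide) _ (by decide) (by decide) (by decide) (by decide) _ _ le_rfl]
  rw [pvStep _ _ (by decide) (by decide) _ (by decide) (by decide) (by decide) (by decide) _ _ le_rfl]
  rw [pvScan_nil_pairs]
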